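-- pv_equiv track=rewrite | github.com/maemreyo/nomorefear | dsa/1__array/2_basic_operations/21_searching/problems/easy/7_find_pair_with_difference/main.py | find_pair_with_difference_1st
-- ===== SOURCE A (Python) =====
-- from typing import List, Optional
--
-- def find_pair_with_difference_1st(arr: list, n: int) -> Optional[List[tuple[int, int]]]:
--     # Check if the 1__array is valid
--     if len(arr) < 2:
--         return None
--
--     ans = []
--
--     for i in range(0, len(arr) - 1):
--         for j in range(i + 1, len(arr)):
--             diff = abs(arr[i] - arr[j])
--
--             if diff == n:
--                 ans.append((arr[i], arr[j]))
--             else: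
--                 continue
--
--     if ans == []:
--         return None
--
--     return ans
-- ===== SOURCE B (Python) =====
-- def find_pair_with_difference_1st(arr: list, n: int):
--     # Inverted index: value -> increasing list of positions. For each i look up
--     # only the two target values arr[i]-n and arr[i]+n instead of scanning the
--     # suffix; merge their (sorted) position lists and keep positions j > i.
--     if len(arr) < 2 or n < 0:
--         return None
--     positions = {}
--     for j, v in enumerate(arr):
--         positions.setdefault(v, []).append(j)
--     ans = []
--     for i, x in enumerate(arr):
--         if n == 0:
--             js = positions.get(x, [])
--         else:
--             js = sorted(positions.get(x - n, []) + positions.get(x + n, []))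
--         ans.extend((x, arr[j]) for j in js if j > i)
--     return ans or None
-- ===== Notes on version B (the rewrite author's own statement) =====
-- stated objective: faster
-- what changed: Replaces the all-pairs nested scan by an inverted index (value -> sorted position list) built in one pass; each position then looks up only the two target values arr[i]-n and arr[i]+n, merges their position lists and keeps positions j>i, so the inner suffix scan disappears.
import Mathlib
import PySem

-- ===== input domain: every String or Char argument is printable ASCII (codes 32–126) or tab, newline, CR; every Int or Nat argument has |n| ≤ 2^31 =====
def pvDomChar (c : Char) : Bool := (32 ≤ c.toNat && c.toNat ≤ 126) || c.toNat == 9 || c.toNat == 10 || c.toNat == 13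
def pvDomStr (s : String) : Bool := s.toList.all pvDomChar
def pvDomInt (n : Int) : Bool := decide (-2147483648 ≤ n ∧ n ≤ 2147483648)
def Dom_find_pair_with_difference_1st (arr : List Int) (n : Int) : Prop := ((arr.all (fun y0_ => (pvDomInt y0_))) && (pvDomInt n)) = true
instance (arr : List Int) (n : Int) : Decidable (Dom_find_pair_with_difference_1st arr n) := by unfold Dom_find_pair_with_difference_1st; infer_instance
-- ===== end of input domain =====

-- B replaces A's all-pairs nested scan by an inverted index value -> position list, looking up only the two target values per position (faster).

-- ===== PORT A =====
-- nested index loops: for i in range(0, len-1): for j in range(i+1, len): append on match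
def find_pair_with_difference_1st (arr : List Int) (n : Int) : Option (List (Int × Int)) :=
  if arr.length < 2 then none
  else
    let ans := (PySem.List.pyRange 0 ((arr.length : Int) - 1) 1).foldl (fun ans i =>
      (PySem.List.pyRange (i + 1) (arr.length : Int) 1).foldl (fun ans j =>
        let diff := |PySem.List.pyGetD arr i 0 - PySem.List.pyGetD arr j 0|
        if diff = n then ans ++ [(PySem.List.pyGetD arr i 0, PySem.List.pyGetD arr j 0)] else ans) ans) []
    if ans = [] then none else some ans

-- ===== PORT B =====
-- build positions: value -> increasing list of indices; per position i look up the index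
-- lists of the two targets x-n and x+n only, merge them, keep j > i
def find_pair_with_difference_1st_alt (arr : List Int) (n : Int) : Option (List (Int × Int)) :=
  if arr.length < 2 ∨ n < 0 then none
  else
    let idx := (PySem.List.enumerate arr).foldl
      (fun d p => d.modify p.2 [] (fun l => l ++ [p.1])) PySem.Dict.empty
    let ans := (PySem.List.enumerate arr).foldl (fun ans p =>
      let x := p.2
      let js := if n = 0 then idx.getD x []
        else PySem.List.sorted (idx.getD (x - n) [] ++ idx.getD (x + n) []) (fun j => j) false
      ans ++ (js.filter (fun j => decide (p.1 < j))).map (fun j => (x, PySem.List.pyGetD arr j 0))) []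
    if ans = [] then none else some ans

-- ===== PRECONDITION & SPEC =====
def Spec_find_pair_with_difference_1st (arr : List Int) (n : Int) (out : Option (List (Int × Int))) : Prop := out = find_pair_with_difference_1st_alt arr n
instance (arr : List Int) (n : Int) (out : Option (List (Int × Int))) : Decidable (Spec_find_pair_with_difference_1st arr n out) := by unfold Spec_find_pair_with_difference_1st; infer_instance

-- ===== CLAIM (what is proved, stated in full; the proofs are below) =====
def Claim_equal_find_pair_with_difference_1st : Prop := ∀ (arr : List Int) (n : Int), Dom_find_pair_with_difference_1st arr n → Spec_find_pair_with_difference_1st arr n (find_pair_with_difference_1st arr n)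

-- ===== LEMMAS AND PROOFS =====

-- the per-position block of matched pairs, common normal form of both loops
def pvBlock (arr : List Int) (n : Int) (k : Int) : List (Int × Int) :=
  ((arr.drop (k + 1).toNat).filter
      (fun y => decide (|PySem.List.pyGetD arr k 0 - y| = n))).map
    (fun y => (PySem.List.pyGetD arr k 0, y))

-- positions of value v: A's index range filtered by the value test
def pvPos (arr : List Int) (v : Int) : List Int :=
  (PySem.List.pyRange 0 (arr.length : Int) 1).filter (fun j => PySem.List.pyGetD arr j 0 == v)

theorem pvA_loop (arr : List Int) (n : Int) :
    (PySem.List.pyRange 0 ((arr.length : Int) - 1) 1).foldl (fun ans i =>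
      (PySem.List.pyRange (i + 1) (arr.length : Int) 1).foldl (fun ans j =>
        let diff := |PySem.List.pyGetD arr i 0 - PySem.List.pyGetD arr j 0|
        if diff = n then ans ++ [(PySem.List.pyGetD arr i 0, PySem.List.pyGetD arr j 0)] else ans) ans) []
    = (PySem.List.pyRange 0 ((arr.length : Int) - 1) 1).flatMap (pvBlock arr n) := by
  rw [PySem.List.foldl_congr_mem (g := fun ans i => ans ++ pvBlock arr n i)]
  · rw [PySem.List.foldl_append_eq_flatMap, List.nil_append]
  · intro acc i hi
    have h0 : (0:Int) ≤ i := (PySem.List.mem_pyRange_one.1 hi).1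
    have h1 : (0:Int) ≤ i + 1 := by omega
    rw [PySem.List.foldl_pyRange_pyGetD' arr 0
        (f := fun ans y => if |PySem.List.pyGetD arr i 0 - y| = n
          then ans ++ [(PySem.List.pyGetD arr i 0, y)] else ans) acc h1,
      PySem.List.foldl_append_ite]
    rfl

-- the inverted index looks up exactly the positions of v, in increasing order
theorem pvIdx_getD (arr : List Int) (v : Int) :
    ((PySem.List.enumerate arr).foldl
      (fun d p => d.modify p.2 [] (fun l => l ++ [p.1])) PySem.Dict.empty).getD v []
    = pvPos arr v := by
  have hswap : (PySem.List.enumerate arr).foldl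
      (fun d p => d.modify p.2 [] (fun l => l ++ [p.1])) PySem.Dict.empty
    = ((PySem.List.enumerate arr).map Prod.swap).foldl
      (fun d q => d.modify q.1 [] (fun l => l ++ [q.2])) PySem.Dict.empty := by
    rw [List.foldl_map]; rfl
  rw [hswap, PySem.Dict.getD_foldl_modify_append, PySem.Dict.getD_empty, List.nil_append]
  rw [PySem.List.enumerate_eq_map_pyRange (d := 0), List.map_map, List.filter_map, List.map_map]
  simp [pvPos, Function.comp_def]

-- disjoint filters concatenated are a permutation of the disjunction filter
theorem pvFilter_or_perm {α : Type} (p q : α → Bool) (l : List α)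
    (h : ∀ x ∈ l, ¬(p x = true ∧ q x = true)) :
    (l.filter p ++ l.filter q).Perm (l.filter (fun x => p x || q x)) := by
  induction l with
  | nil => simp
  | cons a t ih =>
    have ht := ih (fun x hx => h x (List.mem_cons_of_mem a hx))
    have ha := h a List.mem_cons_self
    by_cases hp : p a = true
    · have hq : q a = false := by
        cases hq : q a with
        | false => rfl
        | true => exact absurd ⟨hp, hq⟩ ha
      simp only [List.filter_cons, hp, hq, Bool.true_or, if_true]
      simpa using ht.cons a
    · have hp' : p a = false := by simpa using hp
      by_cases hq : q a = true
      · simp only [List.filter_cons, hp', hq, Bool.false_or, if_true]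
        exact List.perm_middle.trans (ht.cons a)
      · have hq' : q a = false := by simpa using hq
        simp only [List.filter_cons, hp', hq', Bool.false_or]
        exact ht

-- both branches of B compute exactly the positions j with |x - arr[j]| = n, increasing
theorem pvJs_eq (arr : List Int) (n x : Int) (hn : 0 ≤ n) :
    (if n = 0 then pvPos arr x
      else PySem.List.sorted (pvPos arr (x - n) ++ pvPos arr (x + n)) (fun j => j) false)
    = (PySem.List.pyRange 0 (arr.length : Int) 1).filter
        (fun j => decide (|x - PySem.List.pyGetD arr j 0| = n)) := by
  by_cases h0 : n = 0
  · subst h0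
    simp only [if_true, pvPos]
    apply List.filter_congr
    intro j _
    have h : (|x - PySem.List.pyGetD arr j 0| = 0) ↔ (PySem.List.pyGetD arr j 0 = x) := by
      rw [abs_eq_zero, sub_eq_zero]
      exact ⟨fun h => h.symm, fun h => h.symm⟩
    simp only [h]
    rfl
  · simp only [h0, if_false]
    have hrhs : (PySem.List.pyRange 0 (arr.length : Int) 1).filter
        (fun j => decide (|x - PySem.List.pyGetD arr j 0| = n))
      = (PySem.List.pyRange 0 (arr.length : Int) 1).filter
        (fun j => (PySem.List.pyGetD arr j 0 == x - n) || (PySem.List.pyGetD arr j 0 == x + n)) := by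
      apply List.filter_congr
      intro j _
      have h : (|x - PySem.List.pyGetD arr j 0| = n)
          ↔ (PySem.List.pyGetD arr j 0 = x - n ∨ PySem.List.pyGetD arr j 0 = x + n) := by
        rw [abs_eq hn]; omega
      simp only [h, Bool.decide_or]
      rfl
    rw [hrhs]
    apply PySem.List.sorted_eq_of_perm_of_pairwise_lt
    · exact ((pvFilter_or_perm _ _ _ (by
        intro j _ ⟨h1, h2⟩
        have e1 := of_decide_eq_true h1
        have e2 := of_decide_eq_true h2
        simp at e1 e2
        omega)).symm)
    · exact (PySem.List.pairwise_lt_pyRange_one 0 (arr.length : Int)).filter _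

-- filtering j > i on the 0..len range gives the i+1..len range
theorem pvFilter_gt (L i : Int) (h0 : 0 ≤ i) (hL : i < L) :
    (PySem.List.pyRange 0 L 1).filter (fun j => decide (i < j))
    = PySem.List.pyRange (i + 1) L 1 := by
  rw [PySem.List.pyRange_one_append 0 (i+1) L (by omega) (by omega), List.filter_append]
  have h1 : (PySem.List.pyRange 0 (i+1) 1).filter (fun j => decide (i < j)) = [] := by
    rw [List.filter_eq_nil_iff]
    intro x hx
    have := (PySem.List.mem_pyRange_one.1 hx).2
    simp; omega
  have h2 : (PySem.List.pyRange (i+1) L 1).filter (fun j => decide (i < j))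
      = PySem.List.pyRange (i+1) L 1 := by
    rw [List.filter_eq_self]
    intro x hx
    have := (PySem.List.mem_pyRange_one.1 hx).1
    simp; omega
  rw [h1, h2, List.nil_append]

-- B's per-position block equals the common normal form
theorem pvB_block (arr : List Int) (n i : Int) (h0 : 0 ≤ i)
    (hi : i < (arr.length : Int)) :
    (((PySem.List.pyRange 0 (arr.length : Int) 1).filter
        (fun j => decide (|PySem.List.pyGetD arr i 0 - PySem.List.pyGetD arr j 0| = n))).filter
      (fun j => decide (i < j))).map
        (fun j => (PySem.List.pyGetD arr i 0, PySem.List.pyGetD arr j 0))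
    = pvBlock arr n i := by
  rw [List.filter_filter,
    show (fun a => decide (i < a) &&
        decide (|PySem.List.pyGetD arr i 0 - PySem.List.pyGetD arr a 0| = n))
      = (fun a => decide (|PySem.List.pyGetD arr i 0 - PySem.List.pyGetD arr a 0| = n) &&
        decide (i < a)) from funext fun a => Bool.and_comm _ _,
    ← List.filter_filter, pvFilter_gt _ i h0 hi]
  have hmap : (fun j => (PySem.List.pyGetD arr i 0, PySem.List.pyGetD arr j 0))
      = (fun y => (PySem.List.pyGetD arr i 0, y)) ∘ (fun j => PySem.List.pyGetD arr j 0) := rfl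
  have hflt : (fun j => decide (|PySem.List.pyGetD arr i 0 - PySem.List.pyGetD arr j 0| = n))
      = (fun y => decide (|PySem.List.pyGetD arr i 0 - y| = n))
        ∘ (fun j => PySem.List.pyGetD arr j 0) := rfl
  rw [hmap, hflt, ← List.map_map, ← List.filter_map,
    PySem.List.map_pyGetD_pyRange' arr 0 (show (0:Int) ≤ i + 1 by omega)]
  rfl

-- B's whole loop produces the same flatMap of blocks over the full index range
theorem pvB_loop (arr : List Int) (n : Int) (hn : 0 ≤ n) :
    (PySem.List.enumerate arr).foldl (fun ans p =>
      let x := p.2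
      let js := if n = 0 then
          ((PySem.List.enumerate arr).foldl
            (fun d q => d.modify q.2 [] (fun l => l ++ [q.1])) PySem.Dict.empty).getD x []
        else PySem.List.sorted
          (((PySem.List.enumerate arr).foldl
            (fun d q => d.modify q.2 [] (fun l => l ++ [q.1])) PySem.Dict.empty).getD (x - n) [] ++
           ((PySem.List.enumerate arr).foldl
            (fun d q => d.modify q.2 [] (fun l => l ++ [q.1])) PySem.Dict.empty).getD (x + n) [])
          (fun j => j) false
      ans ++ (js.filter (fun j => decide (p.1 < j))).map (fun j => (x, PySem.List.pyGetD arr j 0))) []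
    = (PySem.List.pyRange 0 (arr.length : Int) 1).flatMap (pvBlock arr n) := by
  simp only [pvIdx_getD, pvJs_eq arr n _ hn]
  rw [PySem.List.foldl_congr_mem' (g := fun ans p => ans ++ pvBlock arr n p.1)]
  · rw [PySem.List.enumerate_eq_map_pyRange (d := 0), List.foldl_map,
      PySem.List.foldl_append_eq_flatMap, List.nil_append]
    simp only [PySem.List.len_eq]
  · intro p hp acc
    rw [PySem.List.mem_enumerate_iff] at hp
    obtain ⟨k, hk, hpk⟩ := hp
    subst hpk
    have h1 : ((0:Int) + (k:Int)) = (k:Int) := by omega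
    have h2 : arr[k] = PySem.List.pyGetD arr ((k:Int)) 0 := by
      rw [PySem.List.pyGetD_natCast, List.getD_eq_getElem _ _ hk]
    simp only [h1, h2]
    rw [pvB_block arr n (k:Int) (by omega) (by exact_mod_cast hk)]

theorem pvBlock_last (arr : List Int) (n : Int) (h : 1 ≤ arr.length) :
    pvBlock arr n ((arr.length : Int) - 1) = [] := by
  unfold pvBlock
  have : ((arr.length : Int) - 1 + 1).toNat = arr.length := by omega
  rw [this, List.drop_length]
  rfl

theorem pvBlock_neg (arr : List Int) (n : Int) (hn : n < 0) (k : Int) :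
    pvBlock arr n k = [] := by
  unfold pvBlock
  have : ∀ y, (decide (|PySem.List.pyGetD arr k 0 - y| = n)) = false := by
    intro y
    have := abs_nonneg (PySem.List.pyGetD arr k 0 - y)
    simp; omega
  simp [this]

-- ===== VERDICT (by name: the statement is the Claim_ definition above) =====
theorem find_pair_with_difference_1st_spec : Claim_equal_find_pair_with_difference_1st := by
  intro arr n _
  unfold Spec_find_pair_with_difference_1st find_pair_with_difference_1st find_pair_with_difference_1st_alt
  by_cases hlen : arr.length < 2
  · simp [hlen]
  · by_cases hneg : n < 0
    · simp only [hlen, hneg, or_true, if_true, if_false]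
      rw [pvA_loop]
      have : (PySem.List.pyRange 0 ((arr.length : Int) - 1) 1).flatMap (pvBlock arr n) = [] := by
        rw [List.flatMap_eq_nil_iff]
        intro k _
        exact pvBlock_neg arr n hneg k
      simp [this]
    · have hn : 0 ≤ n := by omega
      simp only [hlen, hneg, or_false, if_false]
      rw [pvA_loop, pvB_loop arr n hn]
      have h1 : (0:Int) ≤ (arr.length : Int) - 1 := by omega
      have h2 : (arr.length : Int) = ((arr.length : Int) - 1) + 1 := by omega
      rw [h2, PySem.List.pyRange_one_succ_right h1, List.flatMap_append]
      simp [pvBlock_last arr n (by omega)]
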